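-- pv_equiv track=rewrite | github.com/johnnyw0/ProblemsSolutions | Projects/Uff/lab7/lab7_3.py | eh_tripla_pitag_prim
-- ===== SOURCE A (Python) =====
-- def get_mdc(x, y):
--     mdc = 1
--     div = 2
--     while div <= x:
--         if x % div == 0 and y % div == 0:
--             mdc = div
--         div += 1
--     return mdc
--
-- def eh_tripla_pitag_prim(lista):
--     pitagorica = primitiva = False
--
--     #Ordenando o vetor usando o método selection sort
--     for i in range(len(lista)):
--         pos = i
--         for j in range(i+1, len(lista)):
--             if lista[j] < lista[pos]:
--                 pos = j
--         lista[i], lista[pos] = lista[pos], lista[i]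
--
--     #Verificando se é uma tripla pitagórica
--     if lista[0]**2 + lista[1]**2 == lista[2]**2:
--         pitagorica = True
--
--     #Verificando se é primitiva
--     if get_mdc(lista[0], lista[1]) == 1 and get_mdc(lista[0], lista[2]) == 1 and get_mdc(lista[1], lista[2]) == 1:
--         primitiva = True
--
--     return primitiva and pitagorica
-- ===== SOURCE B (Python) =====
-- def eh_tripla_pitag_prim(lista):
--     # mutates lista in place (ascending), same as the original
--     lista.sort()
--     a, b, c = lista[0], lista[1], lista[2]
--
--     def coprime(x, y):
--         # get_mdc only scans divisors in [2, x], so for x < 2 it always reports 1;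
--         # for x >= 2 its result is the true gcd, computed here by Euclid's algorithm.
--         if x < 2:
--             return True
--         y = abs(y)
--         while y:
--             x, y = y, x % y
--         return x == 1
--
--     return a * a + b * b == c * c and coprime(a, b) and coprime(a, c) and coprime(b, c)
-- ===== Notes on version B (the rewrite author's own statement) =====
-- stated objective: faster
-- what changed: The O(n^2) hand-written selection sort is replaced by the library in-place sort, and the coprimality test by exhaustive trial division up to x is replaced by Euclid's gcd algorithm (with the scan-range fact that divisors are only sought in [2,x] stated as the x<2 case).
import Mathlib
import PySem

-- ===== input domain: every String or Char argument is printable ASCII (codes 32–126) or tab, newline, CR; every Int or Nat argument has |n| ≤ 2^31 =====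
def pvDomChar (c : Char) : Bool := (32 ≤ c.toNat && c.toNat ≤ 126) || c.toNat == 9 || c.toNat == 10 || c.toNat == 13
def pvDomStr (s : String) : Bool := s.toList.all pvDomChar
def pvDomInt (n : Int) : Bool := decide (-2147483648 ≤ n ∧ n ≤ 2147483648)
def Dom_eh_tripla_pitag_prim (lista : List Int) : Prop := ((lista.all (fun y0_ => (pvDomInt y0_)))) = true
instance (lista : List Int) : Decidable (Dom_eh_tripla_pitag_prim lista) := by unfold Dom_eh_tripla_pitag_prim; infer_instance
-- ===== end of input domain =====

-- B replaces A's hand-written selection sort by the library sort and A's coprimality test by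
-- exhaustive trial division up to x with Euclid's gcd algorithm (objective: faster). Both
-- Pythons mutate `lista` to ascending order; the equivalence proved here is about the RETURN
-- value (the mutation is identical anyway).


-- ===== PORT A =====
-- while div <= x: if x % div == 0 and y % div == 0: mdc = div; div += 1
def getMdcLoop (x y mdc div : Int) : Int :=
  if _h : div ≤ x then
    getMdcLoop x y (if PySem.Int.mod x div = 0 ∧ PySem.Int.mod y div = 0 then div else mdc) (div + 1)
  else mdc
termination_by (x + 1 - div).toNat
decreasing_by omega

def get_mdc (x y : Int) : Int := getMdcLoop x y 1 2

-- inner loop: pos = i; for j in range(i+1, len(lista)): if lista[j] < lista[pos]: pos = j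
def innerLoop (l : List Int) (i : Nat) : Nat :=
  (List.range' (i + 1) (l.length - (i + 1))).foldl
    (fun pos j => if l.getD j 0 < l.getD pos 0 then j else pos) i

-- body of the outer loop: find pos, then lista[i], lista[pos] = lista[pos], lista[i]
def selStep (l : List Int) (i : Nat) : List Int :=
  let pos := innerLoop l i
  (l.set i (l.getD pos 0)).set pos (l.getD i 0)

-- for i in range(len(lista)): …
def selSort (l : List Int) : List Int := (List.range l.length).foldl selStep l

def eh_tripla_pitag_prim (lista : List Int) : Bool :=
  let s := selSort lista
  let a := (PySem.List.pyGet? s 0).getD 0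
  let b := (PySem.List.pyGet? s 1).getD 0
  let c := (PySem.List.pyGet? s 2).getD 0
  let pitagorica : Bool := a ^ 2 + b ^ 2 == c ^ 2
  let primitiva : Bool := get_mdc a b == 1 && get_mdc a c == 1 && get_mdc b c == 1
  primitiva && pitagorica

-- ===== PORT B =====
-- termination helper for the Euclid loop below (cited by name in decreasing_by)
lemma pyMod_natAbs_lt (x y : Int) (h : y ≠ 0) :
    (PySem.Int.mod x y).natAbs < y.natAbs := by
  rcases lt_or_gt_of_ne h with hneg | hpos
  · have h1 := PySem.Int.mod_neg_bounds x hneg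
    omega
  · have h1 := PySem.Int.mod_nonneg x hpos
    have h2 := PySem.Int.mod_lt x hpos
    omega

-- while y: x, y = y, x % y
def euclidLoop (x y : Int) : Int :=
  if h : y = 0 then x else euclidLoop y (PySem.Int.mod x y)
termination_by y.natAbs
decreasing_by exact pyMod_natAbs_lt x y h

-- if x < 2: return True; y = abs(y); while y: x, y = y, x % y; return x == 1
def coprimeB (x y : Int) : Bool :=
  if x < 2 then true else euclidLoop x |y| == 1

def eh_tripla_pitag_prim_alt (lista : List Int) : Bool :=
  let s := PySem.List.sorted lista (fun x => x) false
  let a := (PySem.List.pyGet? s 0).getD 0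
  let b := (PySem.List.pyGet? s 1).getD 0
  let c := (PySem.List.pyGet? s 2).getD 0
  (a * a + b * b == c * c) && coprimeB a b && coprimeB a c && coprimeB b c

-- ===== PRECONDITION & SPEC =====
-- Pre_ excludes only lists of length < 3, on which both A and B raise IndexError.
def Pre_eh_tripla_pitag_prim (lista : List Int) : Prop := 3 ≤ lista.length
instance (lista : List Int) : Decidable (Pre_eh_tripla_pitag_prim lista) := by
  unfold Pre_eh_tripla_pitag_prim; infer_instance

def pvWitness_eh_tripla_pitag_prim : List Int := [3, 4, 5]

def Spec_eh_tripla_pitag_prim (lista : List Int) (out : Bool) : Prop := out = eh_tripla_pitag_prim_alt lista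
instance (lista : List Int) (out : Bool) : Decidable (Spec_eh_tripla_pitag_prim lista out) := by unfold Spec_eh_tripla_pitag_prim; infer_instance

-- ===== CLAIM (what is proved, stated in full; the proofs are below) =====
def Claim_equal_eh_tripla_pitag_prim : Prop := ∀ (lista : List Int), Dom_eh_tripla_pitag_prim lista → Pre_eh_tripla_pitag_prim lista → Spec_eh_tripla_pitag_prim lista (eh_tripla_pitag_prim lista)

-- ===== LEMMAS AND PROOFS =====

-- get_mdc loop returns 1 iff nothing in [div, x] divides both (given mdc = 1 starts it)
lemma getMdcLoop_eq_one_iff (x y : Int) : ∀ (mdc div : Int), 2 ≤ div →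
    (getMdcLoop x y mdc div = 1 ↔
      (mdc = 1 ∧ ∀ d : Int, div ≤ d → d ≤ x →
        ¬(PySem.Int.mod x d = 0 ∧ PySem.Int.mod y d = 0))) := by
  intro mdc div
  induction mdc, div using getMdcLoop.induct x y with
  | case1 mdc div hle ih =>
    intro h2
    rw [getMdcLoop, dif_pos hle]
    simp only [dite_eq_ite] at ih
    rw [ih (by omega)]
    by_cases hP : PySem.Int.mod x div = 0 ∧ PySem.Int.mod y div = 0
    · rw [if_pos hP]
      constructor
      · rintro ⟨hd1, -⟩; omega
      · rintro ⟨-, hall⟩; exact absurd hP (hall div le_rfl hle)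
    · rw [if_neg hP]
      constructor
      · rintro ⟨h1, hall⟩
        refine ⟨h1, fun d hd1 hd2 => ?_⟩
        rcases eq_or_lt_of_le hd1 with rfl | hlt
        · exact hP
        · exact hall d (by omega) hd2
      · rintro ⟨h1, hall⟩
        exact ⟨h1, fun d hd1 hd2 => hall d (by omega) hd2⟩
  | case2 mdc div hle =>
    intro _
    rw [getMdcLoop, dif_neg hle]
    constructor
    · intro h; exact ⟨h, fun d hd1 hd2 _ => hle (le_trans hd1 hd2)⟩
    · exact fun h => h.1

lemma get_mdc_eq_one_iff (x y : Int) :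
    (get_mdc x y = 1 ↔
      ∀ d : Int, 2 ≤ d → d ≤ x → ¬(PySem.Int.mod x d = 0 ∧ PySem.Int.mod y d = 0)) := by
  rw [get_mdc, getMdcLoop_eq_one_iff x y 1 2 le_rfl]
  simp

-- Euclid's loop computes Int.gcd on nonnegative arguments
lemma euclidLoop_eq_gcd : ∀ (x y : Int), 0 ≤ x → 0 ≤ y → euclidLoop x y = (Int.gcd x y : Int) := by
  intro x y
  induction x, y using euclidLoop.induct with
  | case1 x =>
    intro hx _
    rw [euclidLoop, dif_pos rfl]
    simp [Int.gcd, Int.natAbs_of_nonneg hx]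
  | case2 x y h ih =>
    intro hx hy
    have hypos : 0 < y := lt_of_le_of_ne hy (Ne.symm h)
    rw [euclidLoop, dif_neg h]
    rw [ih hy (PySem.Int.mod_nonneg x hypos)]
    congr 1
    obtain ⟨m, rfl⟩ := Int.eq_ofNat_of_zero_le hx
    obtain ⟨n, rfl⟩ := Int.eq_ofNat_of_zero_le hy
    rw [show PySem.Int.mod (m : Int) (n : Int) = ((m % n : Nat) : Int) from
      PySem.Int.mod_natCast m n]
    simp only [Int.gcd_natCast_natCast]
    rw [Nat.gcd_comm n (m % n), ← Nat.gcd_rec n m, Nat.gcd_comm n m]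

-- A's trial-division "gcd == 1" test agrees with B's coprime
lemma coprimeB_eq (x y : Int) : (get_mdc x y == 1) = coprimeB x y := by
  unfold coprimeB
  by_cases hx : x < 2
  · rw [if_pos hx]
    have h1 : get_mdc x y = 1 := by
      rw [get_mdc_eq_one_iff]
      intro d hd1 hd2
      omega
    simp [h1]
  · rw [if_neg hx]
    rw [not_lt] at hx
    have hx0 : (0 : Int) ≤ x := by omega
    rw [euclidLoop_eq_gcd x |y| hx0 (abs_nonneg y)]
    have hgabs : Int.gcd x |y| = Int.gcd x y := by
      unfold Int.gcd; rw [Int.natAbs_abs]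
    rw [hgabs]
    have hiff : get_mdc x y = 1 ↔ Int.gcd x y = 1 := by
      rw [get_mdc_eq_one_iff]
      constructor
      · intro hall
        by_contra hne
        have hgpos : 0 < Int.gcd x y := Int.gcd_pos_of_ne_zero_left y (by omega)
        have hg2 : 2 ≤ (Int.gcd x y : Int) := by
          have : Int.gcd x y ≠ 1 := hne
          omega
        have hdx : (Int.gcd x y : Int) ∣ x := Int.gcd_dvd_left x y
        have hdy : (Int.gcd x y : Int) ∣ y := Int.gcd_dvd_right x y
        have hle : (Int.gcd x y : Int) ≤ x := Int.le_of_dvd (by omega) hdx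
        exact hall _ hg2 hle ⟨(PySem.Int.mod_eq_zero_iff_dvd x _).mpr hdx,
          (PySem.Int.mod_eq_zero_iff_dvd y _).mpr hdy⟩
      · intro hg d hd1 hd2 ⟨hdx, hdy⟩
        have h1 : d ∣ (Int.gcd x y : Int) := by
          rw [Int.coe_gcd]
          exact dvd_gcd ((PySem.Int.mod_eq_zero_iff_dvd x d).mp hdx)
            ((PySem.Int.mod_eq_zero_iff_dvd y d).mp hdy)
        rw [hg] at h1
        have := Int.le_of_dvd (by norm_num) h1
        omega
    by_cases h : get_mdc x y = 1
    · simp [h, (hiff.mp h : Int.gcd x y = 1)]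
    · have h2 : Int.gcd x y ≠ 1 := fun hc => h (hiff.mpr hc)
      have h3 : (Int.gcd x y : Int) ≠ 1 := by exact_mod_cast h2
      simp [h, h3]

lemma foldl_shift (a : Int) (l : List Int) : ∀ (xs : List Nat) (p : Nat),
    xs.foldl (fun pos j =>
        if (a :: l).getD (j + 1) 0 < (a :: l).getD pos 0 then j + 1 else pos) (p + 1)
    = (xs.foldl (fun pos j => if l.getD j 0 < l.getD pos 0 then j else pos) p) + 1 := by
  intro xs
  induction xs with
  | nil => intro p; rfl
  | cons j xs ih =>
    intro p
    simp only [List.foldl_cons, List.getD_cons_succ]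
    rw [← apply_ite (· + 1)]
    exact ih _

lemma innerLoop_cons (a : Int) (l : List Int) (i : Nat) :
    innerLoop (a :: l) (i + 1) = innerLoop l i + 1 := by
  unfold innerLoop
  have hlen : (a :: l).length - (i + 2) = l.length - (i + 1) := by
    simp only [List.length_cons]; omega
  rw [hlen]
  have hr : List.range' (i + 2) (l.length - (i + 1))
      = (List.range' (i + 1) (l.length - (i + 1))).map (· + 1) := by
    rw [List.range'_eq_map_range, List.range'_eq_map_range, List.map_map]
    exact List.map_congr_left (fun k _ => by simp; omega)
  rw [hr, List.foldl_map]
  exact foldl_shift a l _ i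

lemma selStep_cons (a : Int) (l : List Int) (i : Nat) :
    selStep (a :: l) (i + 1) = a :: selStep l i := by
  unfold selStep
  rw [innerLoop_cons]
  simp only [List.getD_cons_succ, List.set_cons_succ]

lemma foldl_argmin_spec (L : List Int) : ∀ (xs : List Nat) (p : Nat),
    (xs.foldl (fun pos j => if L.getD j 0 < L.getD pos 0 then j else pos) p = p ∨
     xs.foldl (fun pos j => if L.getD j 0 < L.getD pos 0 then j else pos) p ∈ xs) ∧
    L.getD (xs.foldl (fun pos j => if L.getD j 0 < L.getD pos 0 then j else pos) p) 0 ≤ L.getD p 0 ∧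
    ∀ j ∈ xs, L.getD (xs.foldl (fun pos j => if L.getD j 0 < L.getD pos 0 then j else pos) p) 0 ≤ L.getD j 0 := by
  intro xs
  induction xs with
  | nil => intro p; exact ⟨Or.inl rfl, le_rfl, by simp⟩
  | cons j xs ih =>
    intro p
    simp only [List.foldl_cons]
    by_cases h : L.getD j 0 < L.getD p 0
    · rw [if_pos h]
      obtain ⟨hm, hle, hall⟩ := ih j
      refine ⟨Or.inr ?_, le_of_lt (lt_of_le_of_lt hle h), ?_⟩
      · rcases hm with h' | h'
        · rw [h']; exact List.mem_cons_self
        · exact List.mem_cons_of_mem _ h'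
      intro k hk
      rcases List.mem_cons.mp hk with rfl | hk
      · exact hle
      · exact hall k hk
    · rw [if_neg h]
      obtain ⟨hm, hle, hall⟩ := ih p
      refine ⟨hm.imp id (List.mem_cons_of_mem _), hle, ?_⟩
      intro k hk
      rcases List.mem_cons.mp hk with rfl | hk
      · exact le_trans hle (not_lt.mp h)
      · exact hall k hk

lemma innerLoop_zero_spec (x : Int) (l : List Int) :
    innerLoop (x :: l) 0 < (x :: l).length ∧
    ∀ j, j < (x :: l).length → (x :: l).getD (innerLoop (x :: l) 0) 0 ≤ (x :: l).getD j 0 := by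
  unfold innerLoop
  obtain ⟨hm, hle, hall⟩ := foldl_argmin_spec (x :: l) (List.range' (0 + 1) ((x :: l).length - (0 + 1))) 0
  constructor
  · rcases hm with h' | h'
    · rw [h']; simp
    · have := List.mem_range'_1.mp h'
      simp only [List.length_cons] at this ⊢
      omega
  · intro j hj
    rcases Nat.eq_zero_or_pos j with rfl | hjpos
    · exact hle
    · exact hall j (List.mem_range'_1.mpr (by simp only [List.length_cons] at hj ⊢; omega))

lemma getD_eq_getElem' (L : List Int) (j : Nat) (h : j < L.length) : L.getD j 0 = L[j] :=
  List.getD_eq_getElem L 0 h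

lemma selStep_zero_spec (x : Int) (l : List Int) :
    ∃ m t, selStep (x :: l) 0 = m :: t ∧ (m :: t).Perm (x :: l) ∧ ∀ z ∈ (x :: l), m ≤ z := by
  obtain ⟨hlt, hmin⟩ := innerLoop_zero_spec x l
  have hmin' : ∀ z ∈ (x :: l), (x :: l).getD (innerLoop (x :: l) 0) 0 ≤ z := by
    intro z hz
    obtain ⟨j, hj, rfl⟩ := List.mem_iff_getElem.mp hz
    rw [← getD_eq_getElem' _ j hj]
    exact hmin j hj
  rcases hq : innerLoop (x :: l) 0 with _ | q
  · refine ⟨x, l, ?_, List.Perm.refl _, ?_⟩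
    · simp only [selStep, hq, List.getD_cons_zero, List.set_cons_zero]
    · intro z hz
      have := hmin' z hz
      rwa [hq, List.getD_cons_zero] at this
  · have hql : q < l.length := by
      rw [hq] at hlt; simp only [List.length_cons] at hlt; omega
    refine ⟨l[q], l.set q x, ?_, ?_, ?_⟩
    · simp only [selStep, hq, List.getD_cons_succ, List.getD_cons_zero, List.set_cons_zero,
        List.set_cons_succ, getD_eq_getElem' l q hql]
    · have hsplit : l = l.take q ++ l[q] :: l.drop (q + 1) := by
        conv_lhs => rw [← List.take_append_drop q l]
        rw [List.getElem_cons_drop hql]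
      have hset : l.set q x = l.take q ++ x :: l.drop (q + 1) := by
        rw [List.set_eq_take_append_cons_drop, if_pos hql]
      have hlast : x :: (l.take q ++ l[q] :: l.drop (q + 1)) = x :: l := by rw [← hsplit]
      rw [hset]
      exact (List.Perm.cons _ List.perm_middle).trans
        ((List.Perm.swap _ _ _).trans
          ((List.Perm.cons _ List.perm_middle.symm).trans (hlast ▸ List.Perm.refl _)))
    · intro z hz
      have := hmin' z hz
      rwa [hq, List.getD_cons_succ, getD_eq_getElem' l q hql] at this

lemma foldl_selStep_succ (xs : List Nat) : ∀ (m : Int) (t : List Int),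
    xs.foldl (fun c i => selStep c (Nat.succ i)) (m :: t) = m :: xs.foldl selStep t := by
  induction xs with
  | nil => intro m t; rfl
  | cons i xs ih =>
    intro m t
    simp only [List.foldl_cons]
    rw [show selStep (m :: t) i.succ = m :: selStep t i from selStep_cons m t i]
    exact ih m (selStep t i)

lemma selSort_cons_eq (l t : List Int) (m : Int) (h : selStep l 0 = m :: t)
    (hlen : l.length = t.length + 1) : selSort l = m :: selSort t := by
  unfold selSort
  rw [hlen, List.range_succ_eq_map, List.foldl_cons, h, List.foldl_map]
  exact foldl_selStep_succ (List.range t.length) m t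

lemma selSort_perm_sorted (l : List Int) :
    (selSort l).Perm l ∧ (selSort l).Pairwise (· ≤ ·) := by
  induction hn : l.length using Nat.strong_induction_on generalizing l with
  | _ n ih =>
    cases l with
    | nil => exact ⟨List.Perm.refl _, List.Pairwise.nil⟩
    | cons x xs =>
      obtain ⟨m, t, hstep, hperm, hmin⟩ := selStep_zero_spec x xs
      have hlen : (x :: xs).length = t.length + 1 := by
        have := hperm.length_eq
        simp only [List.length_cons] at this ⊢
        omega
      have hrec := selSort_cons_eq (x :: xs) t m hstep hlen
      have iht := ih t.length (by omega) t rfl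
      rw [hrec]
      refine ⟨(iht.1.cons m).trans hperm, ?_⟩
      rw [List.pairwise_cons]
      exact ⟨fun z hz => hmin z (hperm.mem_iff.mp (List.mem_cons_of_mem m (iht.1.mem_iff.mp hz))),
        iht.2⟩

lemma selSort_eq_sorted (l : List Int) :
    PySem.List.sorted l (fun x => x) false = selSort l := by
  exact PySem.List.sorted_id_eq_of_perm_of_pairwise l (selSort l)
    (selSort_perm_sorted l).1 (selSort_perm_sorted l).2

-- ===== VERDICT (by name: the statement is the Claim_ definition above) =====
theorem eh_tripla_pitag_prim_spec : Claim_equal_eh_tripla_pitag_prim := by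
  intro lista _hdom _hpre
  unfold Spec_eh_tripla_pitag_prim eh_tripla_pitag_prim eh_tripla_pitag_prim_alt
  rw [selSort_eq_sorted lista]
  simp only [← coprimeB_eq, pow_two]
  simp only [Bool.and_comm, Bool.and_assoc, Bool.and_left_comm]
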